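-- pv_equiv track=rewrite | github.com/fineman999/Algorithm | Programmers/PCCP/lonely_alphabet.py | solution
-- ===== SOURCE A (Python) =====
-- def solution(input_string):
--     answer = set()
--     temp = set()
--     for i in range(len(input_string)-1):
--         if input_string[i] != input_string[i+1]:
--             if input_string[i] in temp:
--                 answer.add(input_string[i])
--             temp.add(input_string[i])
--     if input_string[-1] in temp:
--         answer.add(input_string[-1])
--
--     if not answer:
--         return "N"
--
--     result = list(answer)
--     result.sort()
--     return "".join(result)
-- ===== SOURCE B (Python) =====
-- def solution(input_string):
--     # c appears in several separate runs  <=>  its occurrences are not one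
--     # contiguous block  <=>  c * count(c) is not a substring of input_string
--     lonely = [c for c in sorted(set(input_string))
--               if c * input_string.count(c) not in input_string]
--     return "".join(lonely) or "N"
-- ===== Notes on version B (the rewrite author's own statement) =====
-- stated objective: faster
-- what changed: A scans adjacent pairs in a Python-level loop, mutating a seen-set and an answer-set to detect characters ending two runs; B drops the run scan entirely and instead tests, for each distinct character c in sorted order, whether c * count(c) is a substring of the input (occurrences forming one contiguous block means not lonely).
import Mathlib
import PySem

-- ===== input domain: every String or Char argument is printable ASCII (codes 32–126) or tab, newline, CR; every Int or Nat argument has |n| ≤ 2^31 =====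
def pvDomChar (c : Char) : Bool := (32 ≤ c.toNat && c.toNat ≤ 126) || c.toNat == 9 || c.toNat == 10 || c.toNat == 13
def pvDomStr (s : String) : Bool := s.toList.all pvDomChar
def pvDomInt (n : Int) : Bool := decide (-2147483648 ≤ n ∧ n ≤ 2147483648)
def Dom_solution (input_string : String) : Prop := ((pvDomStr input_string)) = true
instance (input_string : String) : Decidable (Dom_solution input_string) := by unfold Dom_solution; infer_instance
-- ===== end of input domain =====

-- B replaces A's per-index run-end scan with a per-distinct-character substring test
-- (c is lonely iff c * count(c) is not a substring); measured faster: the work moves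
-- into C-level str.count / substring search instead of a Python-level loop.


-- ===== PORT A =====
-- A's loop body: state (answer, temp)
def aStep (cs : List Char) (st : PySem.Set Char × PySem.Set Char) (i : Int) :
    PySem.Set Char × PySem.Set Char :=
  if PySem.List.pyGetD cs i ' ' ≠ PySem.List.pyGetD cs (i + 1) ' ' then
    (if PySem.Set.contains st.2 (PySem.List.pyGetD cs i ' ') then
        PySem.Set.add st.1 (PySem.List.pyGetD cs i ' ')
      else st.1,
     PySem.Set.add st.2 (PySem.List.pyGetD cs i ' '))
  else st

def solution (input_string : String) : String :=
  let cs := input_string.toList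
  let st := (PySem.List.pyRange 0 ((cs.length : Int) - 1) 1).foldl (aStep cs)
      (PySem.Set.empty, PySem.Set.empty)
  -- input_string[-1] raises on the empty string (excluded by Pre_); the default is never used inside Pre_
  let last := PySem.List.pyGetD cs (-1) ' '
  let answer := if PySem.Set.contains st.2 last then PySem.Set.add st.1 last else st.1
  if answer = [] then "N"
  else String.ofList (PySem.List.sorted answer (fun x => x) false)

-- ===== PORT B =====
def solution_alt (input_string : String) : String :=
  let chars := input_string.toList
  let lonely := (PySem.List.sorted (PySem.Set.ofList chars) (fun x => x) false).filter
      (fun c => !(PySem.Chars.isIn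
        (PySem.List.pyRepeat [c] ((PySem.List.count chars c : Int))) chars))
  if lonely ≠ [] then String.ofList lonely else "N"

-- ===== PRECONDITION & SPEC =====
-- Pre_ excludes only the empty string, on which A raises IndexError at input_string[-1].
def Pre_solution (input_string : String) : Prop := input_string ≠ ""
instance (input_string : String) : Decidable (Pre_solution input_string) := by
  unfold Pre_solution; infer_instance
def pvWitness_solution : String := "aabab"

def Spec_solution (input_string : String) (out : String) : Prop := out = solution_alt input_string
instance (input_string : String) (out : String) : Decidable (Spec_solution input_string out) := by
  unfold Spec_solution; infer_instance

-- ===== CLAIM (what is proved, stated in full; the proofs are below) =====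
def Claim_equal_solution : Prop := ∀ (input_string : String), Dom_solution input_string → Pre_solution input_string → Spec_solution input_string (solution input_string)

-- ===== LEMMAS AND PROOFS =====

-- run-end chars contributed by the index list L
def rEnds (cs : List Char) (L : List Int) : List Char :=
  (L.filter (fun i => PySem.List.pyGetD cs i ' ' != PySem.List.pyGetD cs (i + 1) ' ')).map
      (fun i => PySem.List.pyGetD cs i ' ')

-- the full list of run-ending characters A's loop inspects (one per maximal run)
def runEnds (cs : List Char) : List Char :=
  rEnds cs (PySem.List.pyRange 0 ((cs.length : Int) - 1) 1) ++ [PySem.List.pyGetD cs (-1) ' ']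

-- structural recursion computing the same run-ending characters
def ends : List Char → List Char
  | [] => []
  | [a] => [a]
  | a :: b :: t => if a = b then ends (b :: t) else a :: ends (b :: t)

-- invariant of A's loop: temp is the set of run-ends seen, answer the chars ending ≥ 2 runs
theorem aFold_inv (cs : List Char) (L : List Int) :
    ∀ (ans temp : PySem.Set Char) (pref : List Char),
      temp = PySem.Set.ofList pref → ans.Nodup →
      (∀ c, c ∈ ans ↔ 2 ≤ pref.count c) →
      (L.foldl (aStep cs) (ans, temp)).2 = PySem.Set.ofList (pref ++ rEnds cs L) ∧
      (L.foldl (aStep cs) (ans, temp)).1.Nodup ∧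
      (∀ c, c ∈ (L.foldl (aStep cs) (ans, temp)).1 ↔ 2 ≤ (pref ++ rEnds cs L).count c) := by
  induction L with
  | nil => intro ans temp pref ht hn hm; simp [rEnds]; exact ⟨ht, hn, hm⟩
  | cons i L ih =>
    intro ans temp pref ht hn hm
    rw [List.foldl_cons]
    by_cases hc : PySem.List.pyGetD cs i ' ' = PySem.List.pyGetD cs (i + 1) ' '
    · have hstep : aStep cs (ans, temp) i = (ans, temp) := by
        simp only [aStep, ne_eq, hc, not_true_eq_false, if_false]
      have hre : rEnds cs (i :: L) = rEnds cs L := by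
        simp [rEnds, hc]
      rw [hstep, hre]
      exact ih ans temp pref ht hn hm
    · have hstep : aStep cs (ans, temp) i =
          (if PySem.Set.contains temp (PySem.List.pyGetD cs i ' ') then
              PySem.Set.add ans (PySem.List.pyGetD cs i ' ')
            else ans,
           PySem.Set.add temp (PySem.List.pyGetD cs i ' ')) := by
        simp only [aStep, ne_eq, hc, not_false_eq_true, if_true]
      have hre : rEnds cs (i :: L) =
          PySem.List.pyGetD cs i ' ' :: rEnds cs L := by
        simp [rEnds, hc]
      rw [hstep, hre]
      have hmemtemp : PySem.Set.contains temp (PySem.List.pyGetD cs i ' ') = true ↔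
          PySem.List.pyGetD cs i ' ' ∈ pref := by
        subst ht; simp [PySem.Set.mem_ofList]
      have htemp' : PySem.Set.add temp (PySem.List.pyGetD cs i ' ') =
          PySem.Set.ofList (pref ++ [PySem.List.pyGetD cs i ' ']) := by
        subst ht; rw [PySem.Set.ofList_append_singleton]
      have hans' : (if PySem.Set.contains temp (PySem.List.pyGetD cs i ' ') then
          PySem.Set.add ans (PySem.List.pyGetD cs i ' ') else ans).Nodup := by
        split
        · exact PySem.Set.nodup_add ans _ hn
        · exact hn
      have hm' : ∀ c, c ∈ (if PySem.Set.contains temp (PySem.List.pyGetD cs i ' ') then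
            PySem.Set.add ans (PySem.List.pyGetD cs i ' ') else ans) ↔
          2 ≤ (pref ++ [PySem.List.pyGetD cs i ' ']).count c := by
        intro c
        rw [List.count_append]
        by_cases hce : c = PySem.List.pyGetD cs i ' '
        · rw [hce]
          by_cases hep : PySem.List.pyGetD cs i ' ' ∈ pref
          · have h1 : 1 ≤ pref.count (PySem.List.pyGetD cs i ' ') :=
              List.one_le_count_iff.mpr hep
            rw [if_pos (hmemtemp.mpr hep), PySem.Set.mem_add]
            simp [hm (PySem.List.pyGetD cs i ' ')]
            omega
          · have h0 : pref.count (PySem.List.pyGetD cs i ' ') = 0 :=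
              List.count_eq_zero.mpr hep
            have hnm : PySem.List.pyGetD cs i ' ' ∉ temp := by
              rw [ht]; simpa [PySem.Set.mem_ofList] using hep
            rw [if_neg (by simpa [PySem.Set.contains_iff] using hnm)]
            simp [hm (PySem.List.pyGetD cs i ' '), h0]
        · have hone : ([PySem.List.pyGetD cs i ' ']).count c = 0 := by
            rw [List.count_singleton,
              if_neg (by simp only [beq_iff_eq]; exact fun h => hce h.symm)]
          rw [hone]
          split
          · rw [PySem.Set.mem_add]
            constructor
            · rintro (h | h)
              · exact (hm c).mp h
              · exact absurd h hce
            · intro h; exact Or.inl ((hm c).mpr h)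
          · simpa using hm c
      have := ih _ _ (pref ++ [PySem.List.pyGetD cs i ' ']) htemp' hans' hm'
      simpa [List.append_assoc] using this

theorem mem_ends (cs : List Char) (c : Char) : c ∈ ends cs ↔ c ∈ cs := by
  induction cs using ends.induct with
  | case1 => simp [ends]
  | case2 a => simp [ends]
  | case3 b t ih => simp [ends, ih]
  | case4 a b t hab ih => simp [ends, hab, ih]

-- a block of c's is infix of a :: u (a ≠ c) iff it is infix of u
theorem rep_infix_cons_ne (a c : Char) (k : Nat) (u : List Char) (h : a ≠ c) :
    List.replicate k c <:+: a :: u ↔ List.replicate k c <:+: u := by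
  constructor
  · intro hin
    rcases List.infix_cons_iff.mp hin with hp | hi
    · cases k with
      | zero => simp
      | succ k =>
        rw [List.replicate_succ] at hp
        exact absurd (List.cons_prefix_cons.mp hp).1.symm h
    · exact hi
  · exact List.infix_cons

-- peeling one c off a maximal block: u begins with c, k = count of c in u
theorem rep_succ_infix_head (c : Char) (u : List Char) (hu : u.head? = some c) :
    List.replicate (u.count c + 1) c <:+: c :: u ↔
      List.replicate (u.count c) c <:+: u := by
  constructor
  · rintro ⟨l, r, h⟩
    cases l with
    | nil =>
      rw [List.nil_append, List.replicate_succ, List.cons_append, List.cons.injEq] at h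
      exact ⟨[], r, by simpa using h.2⟩
    | cons x l' =>
      rw [List.cons_append, List.cons_append, List.cons.injEq] at h
      exfalso
      have hcount := congrArg (List.count c) h.2
      rw [List.count_append, List.count_append, List.count_replicate_self] at hcount
      omega
  · rintro ⟨l, r, h⟩
    have hcount := congrArg (List.count c) h
    rw [List.count_append, List.count_append, List.count_replicate_self] at hcount
    have hl0 : l.count c = 0 := by omega
    cases l with
    | nil =>
      refine ⟨[], r, ?_⟩
      rw [List.nil_append] at h
      rw [List.nil_append, List.replicate_succ, List.cons_append, h]
    | cons x l' =>
      exfalso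
      have h2 : u.head? = some x := by rw [← h]; simp
      rw [hu] at h2
      have hx : x = c := (Option.some_inj.mp h2).symm
      rw [hx, List.count_cons_self] at hl0
      omega
  
-- c ends at most one run iff its occurrences form one contiguous block
theorem ends_count_le_one_iff (cs : List Char) (c : Char) :
    (ends cs).count c ≤ 1 ↔ List.replicate (cs.count c) c <:+: cs := by
  induction cs using ends.induct with
  | case1 => simp [ends]
  | case2 a =>
    by_cases hc : c = a
    · subst hc; simp [ends]
    · simp [ends, Ne.symm hc, List.replicate_zero]
  | case3 b t ih =>
    rw [show ends (b :: b :: t) = ends (b :: t) from by simp [ends]]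
    by_cases hc : c = b
    · subst hc
      have hcnt : (c :: c :: t).count c = (c :: t).count c + 1 := by
        simp
      rw [hcnt, rep_succ_infix_head c (c :: t) rfl]
      exact ih
    · have hcnt : (b :: b :: t).count c = (b :: t).count c := by
        simp [Ne.symm hc]
      rw [hcnt, rep_infix_cons_ne b c _ (b :: t) (fun h => hc h.symm)]
      exact ih
  | case4 a b t hab ih =>
    rw [show ends (a :: b :: t) = a :: ends (b :: t) from by simp [ends, hab]]
    by_cases hc : c = a
    · subst hc
      have hcnt : (c :: b :: t).count c = (b :: t).count c + 1 := by
        simp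
      rw [hcnt, List.count_cons_self]
      constructor
      · intro hle
        have h0 : (ends (b :: t)).count c = 0 := by omega
        have hnm : c ∉ (b :: t) := by
          rw [← mem_ends]
          exact List.count_eq_zero.mp h0
        rw [List.count_eq_zero.mpr hnm]
        exact ⟨[], b :: t, rfl⟩
      · rintro ⟨l, r, h⟩
        have hk0 : (b :: t).count c = 0 := by
          by_contra hk0
          cases l with
          | nil =>
            rw [List.nil_append, List.replicate_succ, List.cons_append,
              List.cons.injEq] at h
            rcases Nat.exists_eq_succ_of_ne_zero hk0 with ⟨m, hm⟩
            rw [hm, List.replicate_succ, List.cons_append, List.cons.injEq] at h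
            exact hab h.2.1
          | cons x l' =>
            rw [List.cons_append, List.cons_append, List.cons.injEq] at h
            have hcount := congrArg (List.count c) h.2
            rw [List.count_append, List.count_append,
              List.count_replicate_self] at hcount
            omega
        have hne : c ∉ ends (b :: t) := by
          rw [mem_ends]
          exact List.count_eq_zero.mp hk0
        rw [List.count_eq_zero.mpr hne]
    · have hcnt : (a :: b :: t).count c = (b :: t).count c := by
        simp [Ne.symm hc]
      have hends : (a :: ends (b :: t)).count c = (ends (b :: t)).count c := by
        simp [Ne.symm hc]
      rw [hcnt, hends, rep_infix_cons_ne a c _ (b :: t) (fun h => hc h.symm)]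
      exact ih

-- index shift: scanning a :: u from index 1 is scanning u from index 0
theorem rEnds_cons_shift (a : Char) (u : List Char) (k : Nat) :
    rEnds (a :: u) (PySem.List.pyRange 1 (1 + (k : Int)) 1) =
      rEnds u (PySem.List.pyRange 0 (k : Int) 1) := by
  unfold rEnds
  rw [PySem.List.pyRange_one 1 (1 + (k : Int)), PySem.List.pyRange_one 0 (k : Int)]
  have h1 : ((1 : Int) + k - 1).toNat = k := by omega
  have h2 : ((k : Int) - 0).toNat = k := by omega
  rw [h1, h2, List.filter_map, List.filter_map, List.map_map, List.map_map]
  have hget : ∀ (j : Nat), PySem.List.pyGetD (a :: u) (1 + (j : Int)) ' ' =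
      PySem.List.pyGetD u ((0 : Int) + (j : Int)) ' ' := by
    intro j
    have e1 : (1 : Int) + (j : Int) = ((j + 1 : Nat) : Int) := by push_cast; ring
    have e2 : (0 : Int) + (j : Int) = ((j : Nat) : Int) := by ring
    rw [e1, e2, PySem.List.pyGetD_natCast, PySem.List.pyGetD_natCast,
      List.getD_cons_succ]
  have hget' : ∀ (j : Nat), PySem.List.pyGetD (a :: u) (1 + (j : Int) + 1) ' ' =
      PySem.List.pyGetD u ((0 : Int) + (j : Int) + 1) ' ' := by
    intro j
    have e1 : (1 : Int) + (j : Int) + 1 = ((j + 2 : Nat) : Int) := by push_cast; ring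
    have e2 : (0 : Int) + (j : Int) + 1 = ((j + 1 : Nat) : Int) := by push_cast; ring
    rw [e1, e2, PySem.List.pyGetD_natCast, PySem.List.pyGetD_natCast,
      List.getD_cons_succ]
  congr 1
  · funext j
    rw [Function.comp, Function.comp]
    rw [hget j]
  · congr 1
    funext j
    rw [Function.comp, Function.comp]
    rw [hget j, hget' j]

theorem pyGetD_one_cons_cons (a b : Char) (t : List Char) :
    PySem.List.pyGetD (a :: b :: t) 1 ' ' = b := by
  rw [show (1 : Int) = ((1 : Nat) : Int) from rfl, PySem.List.pyGetD_natCast]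
  rfl

-- peeling the first index off A's scan of a two-or-more-character list
theorem runEnds_cons_step (a b : Char) (t : List Char) :
    runEnds (a :: b :: t) = (if a != b then [a] else []) ++ runEnds (b :: t) := by
  unfold runEnds
  have hb : (((a :: b :: t).length : Int) - 1) = 1 + (t.length : Int) := by
    simp; omega
  have hb' : (((b :: t).length : Int) - 1) = (t.length : Int) := by simp
  rw [hb, hb', PySem.List.pyRange_one_cons (show (0 : Int) < 1 + (t.length : Int) by omega)]
  have hsplit : rEnds (a :: b :: t) (0 :: PySem.List.pyRange (0 + 1) (1 + (t.length : Int)) 1) =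
      (if a != b then [a] else []) ++
        rEnds (a :: b :: t) (PySem.List.pyRange 1 (1 + (t.length : Int)) 1) := by
    unfold rEnds
    rw [List.filter_cons]
    have h0 : PySem.List.pyGetD (a :: b :: t) 0 ' ' = a := by
      rw [PySem.List.pyGetD_zero_cons]
    have h1 : PySem.List.pyGetD (a :: b :: t) (0 + 1) ' ' = b := by
      rw [show (0 : Int) + 1 = 1 from rfl, pyGetD_one_cons_cons]
    rw [h0, h1, show (0 : Int) + 1 = 1 from rfl]
    by_cases hab : a = b
    · simp [hab]
    · simp only [bne_iff_ne, ne_eq, hab, not_false_eq_true, if_true,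
        List.map_cons, h0]
      rfl
  rw [hsplit, rEnds_cons_shift a (b :: t) t.length]
  have hlast : PySem.List.pyGetD (a :: b :: t) (-1) ' ' =
      PySem.List.pyGetD (b :: t) (-1) ' ' := by
    rw [PySem.List.pyGetD_neg_one (a :: b :: t) ' ' (by simp),
      PySem.List.pyGetD_neg_one (b :: t) ' ' (by simp),
      List.getLast_cons (by simp : (b :: t) ≠ [])]
  rw [hlast, List.append_assoc]

-- the index-based run-end list A inspects is the structural one
theorem runEnds_eq_ends : ∀ (cs : List Char), cs ≠ [] → runEnds cs = ends cs := by
  intro cs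
  induction cs using ends.induct with
  | case1 => intro h; exact absurd rfl h
  | case2 a =>
    intro _
    unfold runEnds rEnds
    rw [show ((([a] : List Char).length : Int) - 1) = 0 from by simp,
      PySem.List.pyRange_one_eq_nil (le_refl (0 : Int))]
    simp [PySem.List.pyGetD_neg_one [a] ' ' (by simp), ends]
  | case3 b t ih =>
    intro _
    rw [runEnds_cons_step b b t, if_neg (by simp), List.nil_append, ih (by simp)]
    simp [ends]
  | case4 a b t hab ih =>
    intro _
    rw [runEnds_cons_step a b t, if_pos (by simp [hab]), ih (by simp)]
    simp [ends, hab]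

-- ===== VERDICT (by name: the statement is the Claim_ definition above) =====
theorem solution_spec : Claim_equal_solution := by
  intro s _ hpre
  unfold Spec_solution
  obtain ⟨htemp, hnd, hmem⟩ := aFold_inv s.toList
      (PySem.List.pyRange 0 ((s.toList.length : Int) - 1) 1)
      PySem.Set.empty PySem.Set.empty [] rfl List.nodup_nil (by simp [PySem.Set.empty])
  set cs := s.toList with hcs
  set L := PySem.List.pyRange 0 ((cs.length : Int) - 1) 1 with hL
  set st := L.foldl (aStep cs) (PySem.Set.empty, PySem.Set.empty) with hst
  set last := PySem.List.pyGetD cs (-1) ' ' with hlast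
  have hA : solution s =
      (if (if PySem.Set.contains st.2 last then PySem.Set.add st.1 last else st.1) = [] then "N"
        else String.ofList (PySem.List.sorted
          (if PySem.Set.contains st.2 last then PySem.Set.add st.1 last else st.1)
          (fun x => x) false)) := rfl
  have hB : solution_alt s =
      (if ((PySem.List.sorted (PySem.Set.ofList cs) (fun x => x) false).filter
            (fun c => !(PySem.Chars.isIn
              (PySem.List.pyRepeat [c] ((PySem.List.count cs c : Int))) cs))) ≠ [] then
          String.ofList ((PySem.List.sorted (PySem.Set.ofList cs) (fun x => x) false).filter
            (fun c => !(PySem.Chars.isIn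
              (PySem.List.pyRepeat [c] ((PySem.List.count cs c : Int))) cs)))
        else "N") := rfl
  rw [hA, hB]
  set answer := (if PySem.Set.contains st.2 last then PySem.Set.add st.1 last else st.1)
    with hansdef
  set lonely := ((PySem.List.sorted (PySem.Set.ofList cs) (fun x => x) false).filter
      (fun c => !(PySem.Chars.isIn
        (PySem.List.pyRepeat [c] ((PySem.List.count cs c : Int))) cs))) with hlonely
  have hcsne : cs ≠ [] := by
    intro h
    apply hpre
    have := congrArg String.ofList h
    simpa [hcs, String.ofList_toList] using this
  have hR : runEnds cs = rEnds cs L ++ [last] := rfl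
  have hndA : answer.Nodup := by
    rw [hansdef]; split
    · exact PySem.Set.nodup_add st.1 last hnd
    · exact hnd
  have hmemA : ∀ c, c ∈ answer ↔ 2 ≤ (runEnds cs).count c := by
    intro c
    rw [hR, List.count_append]
    have hlt : PySem.Set.contains st.2 last = true ↔ last ∈ rEnds cs L := by
      rw [htemp]; simp [PySem.Set.mem_ofList]
    have hmem' : ∀ d, d ∈ st.1 ↔ 2 ≤ (rEnds cs L).count d := by
      intro d; simpa using hmem d
    rw [hansdef]
    by_cases hcl : c = last
    · rw [hcl]
      by_cases hin : last ∈ rEnds cs L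
      · have h1 : 1 ≤ (rEnds cs L).count last := List.one_le_count_iff.mpr hin
        rw [if_pos (hlt.mpr hin), PySem.Set.mem_add]
        simp [hmem' last]
        omega
      · have h0 : (rEnds cs L).count last = 0 := List.count_eq_zero.mpr hin
        have hnt : last ∉ st.2 := by
          rw [htemp]; simpa [PySem.Set.mem_ofList] using hin
        rw [if_neg (by simpa [PySem.Set.contains_iff] using hnt)]
        simp [hmem' last, h0]
    · have hone : ([last]).count c = 0 := by
        rw [List.count_singleton,
          if_neg (by simp only [beq_iff_eq]; exact fun h => hcl h.symm)]
      rw [hone]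
      split
      · rw [PySem.Set.mem_add]
        constructor
        · rintro (h | h)
          · exact (hmem' c).mp h
          · exact absurd h hcl
        · intro h; exact Or.inl ((hmem' c).mpr h)
      · simpa using hmem' c
  have hmemA' : ∀ c, c ∈ answer ↔ ¬ (List.replicate (cs.count c) c <:+: cs) := by
    intro c
    rw [hmemA c, runEnds_eq_ends cs hcsne, ← ends_count_le_one_iff]
    omega
  have hmemB : ∀ c, c ∈ lonely ↔ ¬ (List.replicate (cs.count c) c <:+: cs) := by
    intro c
    rw [hlonely, List.mem_filter]
    have hrep : PySem.List.pyRepeat [c] ((PySem.List.count cs c : Int)) =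
        List.replicate (cs.count c) c := by
      rw [PySem.List.pyRepeat_singleton, PySem.List.count_eq, Int.toNat_natCast]
    constructor
    · rintro ⟨_, hq⟩
      rw [Bool.not_eq_eq_eq_not, Bool.not_true] at hq
      rw [← hrep]
      exact (PySem.Chars.isIn_eq_false_iff _ _).mp hq
    · intro hni
      have hin : c ∈ cs := by
        by_contra hno
        apply hni
        rw [List.count_eq_zero.mpr hno, List.replicate_zero]
        exact List.nil_infix
      refine ⟨?_, ?_⟩
      · rw [PySem.List.mem_sorted, PySem.Set.mem_ofList]; exact hin
      · rw [Bool.not_eq_eq_eq_not, Bool.not_true, hrep]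
        exact (PySem.Chars.isIn_eq_false_iff _ _).mpr hni
  have hpair : lonely.Pairwise (· < ·) :=
    (PySem.List.sorted_ofList_pairwise_lt cs).filter _
  have hndB : lonely.Nodup := hpair.imp (fun h => ne_of_lt h)
  have hperm : lonely.Perm answer :=
    (List.perm_ext_iff_of_nodup hndB hndA).mpr
      (fun c => (hmemB c).trans (hmemA' c).symm)
  have hsort : PySem.List.sorted answer (fun x => x) false = lonely :=
    PySem.List.sorted_eq_of_perm_of_pairwise_lt answer lonely (fun x => x) hperm hpair
  by_cases he : answer = []
  · have hl : lonely = [] := (hperm.trans (he ▸ List.Perm.refl _)).eq_nil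
    rw [if_pos he, if_neg (by simp [hl])]
  · have hl : lonely ≠ [] := fun h => he ((hperm.symm.trans (h ▸ List.Perm.refl _)).eq_nil)
    rw [if_neg he, if_pos hl, hsort]
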